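-- pv_equiv track=rewrite | github.com/edt-yxz-zzd/python3_src | nn_ns/codec/bits2iter_dyncode.py | bits2iter_bitss_zfill
-- ===== SOURCE A (Python) =====
-- import itertools
--
-- class LenError(ValueError):pass
--
-- def bits2iter_bitss_zfill(uint8s, length, fill=0):
--     'fill == None ==>> raise if error'
--     if length < 1:
--         raise ValueError('length < 1')
--     it = iter(uint8s)
--     while True:
--         bits = slice_le(it, length)
--         if len(bits) != length:
--             break
--         yield bits
--     assert len(bits) < length
--     if bits:
--         if fill is None:
--             raise LenError('length not divide len(bits)')
--         bits += (0,)*(length - len(bits))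
--         assert len(bits) == length
--         yield bits
--     return
--
-- def slice_le(iterable, n):
--     return tuple(itertools.islice(iterable, n))
--     return first_le_n
-- ===== SOURCE B (Python) =====
-- class LenError(ValueError): pass
--
-- def bits2iter_bitss_zfill(uint8s, length, fill=0):
--     'fill == None ==>> raise if error'
--     if length < 1:
--         raise ValueError('length < 1')
--     buf = []
--     for x in uint8s:
--         buf.append(x)
--         if len(buf) == length:
--             yield tuple(buf)
--             buf = []
--     if buf:
--         if fill is None:
--             raise LenError('length not divide len(bits)')
--         yield tuple(buf) + (0,)*(length - len(buf))
-- ===== Notes on version B (the rewrite author's own statement) =====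
-- stated objective: idiomatic
-- what changed: Replaced the repeated islice-a-chunk-from-a-shared-iterator while-loop by a single element-wise for-loop maintaining a buffer that is yielded and reset when full, with the partial buffer padded after the loop.
import Mathlib
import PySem

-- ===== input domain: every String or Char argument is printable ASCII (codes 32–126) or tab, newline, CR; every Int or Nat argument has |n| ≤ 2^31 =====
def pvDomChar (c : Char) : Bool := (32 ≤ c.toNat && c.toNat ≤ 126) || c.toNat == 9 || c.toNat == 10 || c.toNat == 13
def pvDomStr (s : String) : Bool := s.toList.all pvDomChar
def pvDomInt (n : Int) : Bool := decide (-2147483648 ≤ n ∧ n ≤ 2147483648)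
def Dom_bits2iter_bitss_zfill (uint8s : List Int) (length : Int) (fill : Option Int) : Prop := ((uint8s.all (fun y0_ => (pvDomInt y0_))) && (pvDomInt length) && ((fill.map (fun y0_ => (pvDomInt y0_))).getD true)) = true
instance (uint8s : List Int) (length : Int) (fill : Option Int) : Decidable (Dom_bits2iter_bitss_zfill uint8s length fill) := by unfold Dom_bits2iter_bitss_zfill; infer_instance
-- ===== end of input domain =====

-- B replaces the islice-a-chunk-at-a-time while-loop by one element-wise loop with a buffer (idiomatic; same O(n) cost).


-- ===== PORT A =====
-- the while-loop: slice the next `l` elements; if a full chunk, yield and loop; else handle the tail.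
-- At Python's raise points (LenError, excluded by Pre_) the port returns [].
def bits2iter_bitss_zfill_go (l : Nat) (hl : 0 < l) (fill : Option Int) (xs : List Int) : List (List Int) :=
  if h2 : (xs.take l).length = l then
    xs.take l :: bits2iter_bitss_zfill_go l hl fill (xs.drop l)
  else
    if xs.take l ≠ [] then
      match fill with
      | none => []   -- raise LenError (outside Pre_): chunks yielded before the raise
      | some _ => [xs.take l ++ List.replicate (l - (xs.take l).length) 0]
    else []
termination_by xs.length
decreasing_by
  simp only [List.length_drop]
  have hx : l ≤ xs.length := by
    by_contra hc
    simp only [List.length_take] at h2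
    omega
  omega

def bits2iter_bitss_zfill (uint8s : List Int) (length : Int) (fill : Option Int) : List (List Int) :=
  if h : length < 1 then []   -- raise ValueError (outside Pre_)
  else bits2iter_bitss_zfill_go length.toNat (by omega) fill uint8s

-- ===== PORT B =====
-- one pass over the elements, maintaining a buffer; flush when full; pad the leftover after the loop.
def bits2iter_bitss_zfill_alt_step (l : Nat) (s : List (List Int) × List Int) (x : Int) : List (List Int) × List Int :=
  let buf := s.2 ++ [x]
  if buf.length = l then (s.1 ++ [buf], []) else (s.1, buf)

def bits2iter_bitss_zfill_alt_finish (l : Nat) (fill : Option Int) (s : List (List Int) × List Int) : List (List Int) :=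
  if s.2 = [] then s.1
  else
    match fill with
    | none => s.1   -- raise LenError (outside Pre_): chunks yielded before the raise
    | some _ => s.1 ++ [s.2 ++ List.replicate (l - s.2.length) 0]

def bits2iter_bitss_zfill_alt (uint8s : List Int) (length : Int) (fill : Option Int) : List (List Int) :=
  if length < 1 then []   -- raise ValueError (outside Pre_)
  else
    let l := length.toNat
    bits2iter_bitss_zfill_alt_finish l fill
      (uint8s.foldl (bits2iter_bitss_zfill_alt_step l) ([], []))

-- ===== PRECONDITION & SPEC =====
-- Pre_ excludes exactly the inputs where A raises: length < 1 (ValueError) and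
-- fill = None with length not dividing len(uint8s) (LenError); B raises there too.
def Pre_bits2iter_bitss_zfill (uint8s : List Int) (length : Int) (fill : Option Int) : Prop :=
  1 ≤ length ∧ (fill = none → (length ∣ (uint8s.length : Int)))
instance (uint8s : List Int) (length : Int) (fill : Option Int) : Decidable (Pre_bits2iter_bitss_zfill uint8s length fill) := by unfold Pre_bits2iter_bitss_zfill; infer_instance

def pvWitness_bits2iter_bitss_zfill : List Int × Int × Option Int := ([1, 2, 3], 2, some 0)

def Spec_bits2iter_bitss_zfill (uint8s : List Int) (length : Int) (fill : Option Int) (out : List (List Int)) : Prop := out = bits2iter_bitss_zfill_alt uint8s length fill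
instance (uint8s : List Int) (length : Int) (fill : Option Int) (out : List (List Int)) : Decidable (Spec_bits2iter_bitss_zfill uint8s length fill out) := by unfold Spec_bits2iter_bitss_zfill; infer_instance

-- ===== CLAIM (what is proved, stated in full; the proofs are below) =====
def Claim_equal_bits2iter_bitss_zfill : Prop := ∀ (uint8s : List Int) (length : Int) (fill : Option Int), Dom_bits2iter_bitss_zfill uint8s length fill → Pre_bits2iter_bitss_zfill uint8s length fill → Spec_bits2iter_bitss_zfill uint8s length fill (bits2iter_bitss_zfill uint8s length fill)

-- ===== LEMMAS AND PROOFS =====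

-- loop invariant: flushing the fold started from (out, buf) with buf not yet full
-- equals out followed by A's chunking of buf ++ xs.
theorem bits2iter_fold_eq (l : Nat) (hl : 0 < l) (fill : Option Int) :
    ∀ (xs : List Int) (out : List (List Int)) (buf : List Int), buf.length < l →
      bits2iter_bitss_zfill_alt_finish l fill
        (xs.foldl (bits2iter_bitss_zfill_alt_step l) (out, buf))
      = out ++ bits2iter_bitss_zfill_go l hl fill (buf ++ xs) := by
  intro xs
  induction xs with
  | nil =>
    intro out buf hb
    have hne : ¬ (buf.take l).length = l := by simp [List.length_take]; omega
    have htake : buf.take l = buf := List.take_of_length_le (by omega)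
    simp only [List.foldl_nil, List.append_nil]
    rw [bits2iter_bitss_zfill_go.eq_def, dif_neg hne, bits2iter_bitss_zfill_alt_finish.eq_def]
    simp only [htake]
    by_cases hbe : buf = []
    · simp [hbe]
    · cases fill <;> simp [hbe]
  | cons x xs ih =>
    intro out buf hb
    simp only [List.foldl_cons]
    rw [bits2iter_bitss_zfill_alt_step]
    by_cases hfull : (buf ++ [x]).length = l
    · simp only [if_pos hfull]
      rw [ih (out ++ [buf ++ [x]]) [] hl]
      have hEq : buf ++ x :: xs = (buf ++ [x]) ++ xs := by simp
      have htake : (buf ++ x :: xs).take l = buf ++ [x] := by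
        rw [hEq, List.take_append_of_le_length (by omega), List.take_of_length_le (by omega)]
      have hdrop : (buf ++ x :: xs).drop l = xs := by
        rw [hEq, ← hfull, List.drop_left]
      have hc : ((buf ++ x :: xs).take l).length = l := by rw [htake]; exact hfull
      have hgo : bits2iter_bitss_zfill_go l hl fill (buf ++ x :: xs)
          = (buf ++ [x]) :: bits2iter_bitss_zfill_go l hl fill xs := by
        rw [bits2iter_bitss_zfill_go.eq_def, dif_pos hc, htake, hdrop]
      rw [hgo]
      simp
    · simp only [if_neg hfull]
      rw [ih out (buf ++ [x]) (by simp at hfull ⊢; omega)]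
      simp

-- ===== VERDICT (by name: the statement is the Claim_ definition above) =====
theorem bits2iter_bitss_zfill_spec : Claim_equal_bits2iter_bitss_zfill := by
  intro uint8s length fill _ hpre
  unfold Spec_bits2iter_bitss_zfill bits2iter_bitss_zfill bits2iter_bitss_zfill_alt
  obtain ⟨h1, _⟩ := hpre
  have hnl : ¬ length < 1 := by omega
  simp only [dif_neg hnl, if_neg hnl]
  have hl : 0 < length.toNat := by omega
  rw [bits2iter_fold_eq length.toNat hl fill uint8s [] [] hl]
  simp
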